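-- pv_equiv track=rewrite | github.com/ahahhh86/AdventOfCode_Python | puzzles/2017/day02.py | _calculate_checksum_part2
-- ===== SOURCE A (Python) =====
-- def _calculate_checksum_part2(value: tuple[tuple]) -> int:
--     def _calculate_checksum(line: tuple) -> int:
--         dividable = []
--         for i in line:
--             for j in line:
--                 if i != j and i % j == 0:
--                     dividable.append(i // j)
--         return sum(dividable)
--
--     return sum(
--         _calculate_checksum(line)
--         for line in value
--     )
-- ===== SOURCE B (Python) =====
-- def _calculate_checksum_part2(value):
--     total = 0
--     for line in value:
--         counts = {}
--         for x in line:
--             counts[x] = counts.get(x, 0) + 1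
--         for v, cv in counts.items():
--             for w, cw in counts.items():
--                 if v != w and w != 0 and v % w == 0:
--                     total += cv * cw * (v // w)
--     return total
-- ===== Notes on version B (the rewrite author's own statement) =====
-- stated objective: alternative
-- what changed: B replaces A's nested loops over all raw element pairs (building a list of quotients and summing it) by a per-line frequency dictionary built in one pass, then sums quotients over pairs of DISTINCT values only, weighted by the product of their counts.
-- crash fix: On any input where some line contains 0 together with a nonzero element, A raises ZeroDivisionError (i % j with j = 0); B skips zero divisors and returns the sum over the remaining pairs (0 at [[0, 2]]). — e.g. on _calculate_checksum_part2([[0, 2]]): A raises ZeroDivisionError, B returns 0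
import Mathlib
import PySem

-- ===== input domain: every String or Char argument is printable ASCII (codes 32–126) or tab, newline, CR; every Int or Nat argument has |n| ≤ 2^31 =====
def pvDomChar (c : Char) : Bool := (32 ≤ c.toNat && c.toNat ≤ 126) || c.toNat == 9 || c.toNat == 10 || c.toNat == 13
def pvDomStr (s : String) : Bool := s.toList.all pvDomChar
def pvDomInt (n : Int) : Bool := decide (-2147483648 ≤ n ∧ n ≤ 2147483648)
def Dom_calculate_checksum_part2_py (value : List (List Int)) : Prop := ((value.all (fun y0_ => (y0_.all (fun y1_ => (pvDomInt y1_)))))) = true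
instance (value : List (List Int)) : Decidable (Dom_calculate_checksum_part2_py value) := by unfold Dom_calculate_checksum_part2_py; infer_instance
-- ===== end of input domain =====

-- B builds a per-line frequency dictionary once and sums quotients over pairs of distinct
-- values weighted by count products, instead of A's nested loops over all raw element pairs.
-- (Objective: alternative algorithm; same result on every input where A returns.)

-- ===== PORT A =====
-- inner helper `_calculate_checksum(line)`: collect i // j for every ordered pair with
-- i != j and i % j == 0 into `dividable`, then sum it
def pvChecksumLine (line : List Int) : Int :=
  (line.foldl (fun dividable i =>
      line.foldl (fun d j =>
          if i ≠ j ∧ PySem.Int.mod i j = 0 then d ++ [PySem.Int.floordiv i j] else d)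
        dividable)
    []).sum

def calculate_checksum_part2_py (value : List (List Int)) : Int :=
  (value.map pvChecksumLine).sum

-- ===== PORT B =====
def calculate_checksum_part2_py_alt (value : List (List Int)) : Int :=
  value.foldl (fun total line =>
    let counts := line.foldl (fun d x => d.insert x (d.getD x 0 + 1)) PySem.Dict.empty
    counts.items.foldl (fun acc vc =>
      counts.items.foldl (fun acc2 wc =>
          if vc.1 ≠ wc.1 ∧ wc.1 ≠ 0 ∧ PySem.Int.mod vc.1 wc.1 = 0
          then acc2 + vc.2 * wc.2 * PySem.Int.floordiv vc.1 wc.1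
          else acc2)
        acc)
      total) 0

-- ===== PRECONDITION & SPEC =====
-- Pre_ excludes exactly the inputs on which the Python A raises ZeroDivisionError:
-- a line containing 0 together with some nonzero element (then i % j runs with j = 0, i ≠ j).
def Pre_calculate_checksum_part2_py (value : List (List Int)) : Prop :=
  ∀ line ∈ value, 0 ∈ line → ∀ x ∈ line, x = 0

instance (value : List (List Int)) : Decidable (Pre_calculate_checksum_part2_py value) := by
  unfold Pre_calculate_checksum_part2_py; infer_instance

def pvWitness_calculate_checksum_part2_py : List (List Int) :=
  [[5, 9, 2, 8], [9, 4, 7, 3], [3, 8, 6, 5]]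

-- On any input where some line contains 0 together with a nonzero element, A raises
-- ZeroDivisionError; B skips zero divisors and returns the sum over the remaining pairs.
def Raises_calculate_checksum_part2_py (value : List (List Int)) : Prop :=
  ∃ line ∈ value, 0 ∈ line ∧ ∃ x ∈ line, x ≠ 0

instance (value : List (List Int)) : Decidable (Raises_calculate_checksum_part2_py value) := by
  unfold Raises_calculate_checksum_part2_py; infer_instance

def pvRaiseWitness_calculate_checksum_part2_py : List (List Int) := [[0, 2]]

def pvRaiseWitnessOut_calculate_checksum_part2_py : Int := 0

def Spec_calculate_checksum_part2_py (value : List (List Int)) (out : Int) : Prop :=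
  out = calculate_checksum_part2_py_alt value

instance (value : List (List Int)) (out : Int) : Decidable (Spec_calculate_checksum_part2_py value out) := by
  unfold Spec_calculate_checksum_part2_py; infer_instance

-- ===== CLAIM (what is proved, stated in full; the proofs are below) =====
def Claim_equal_calculate_checksum_part2_py : Prop := ∀ (value : List (List Int)), Dom_calculate_checksum_part2_py value → Pre_calculate_checksum_part2_py value → Spec_calculate_checksum_part2_py value (calculate_checksum_part2_py value)

def Claim_raises_calculate_checksum_part2_py : Prop := (∀ (value : List (List Int)), Dom_calculate_checksum_part2_py value → Raises_calculate_checksum_part2_py value → ¬ Pre_calculate_checksum_part2_py value) ∧ (Dom_calculate_checksum_part2_py (pvRaiseWitness_calculate_checksum_part2_py) ∧ Raises_calculate_checksum_part2_py (pvRaiseWitness_calculate_checksum_part2_py) ∧ calculate_checksum_part2_py_alt (pvRaiseWitness_calculate_checksum_part2_py) = pvRaiseWitnessOut_calculate_checksum_part2_py)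

-- ===== LEMMAS AND PROOFS =====

-- contribution of one ordered pair, as A computes it
def pvG (i j : Int) : Int :=
  if i ≠ j ∧ PySem.Int.mod i j = 0 then PySem.Int.floordiv i j else 0

-- contribution of one ordered pair, as B computes it
def pvH (i j : Int) : Int :=
  if i ≠ j ∧ j ≠ 0 ∧ PySem.Int.mod i j = 0 then PySem.Int.floordiv i j else 0

lemma pvG_eq_pvH (i j : Int) : pvG i j = pvH i j := by
  unfold pvG pvH
  by_cases hj : j = 0
  · subst hj
    by_cases hi : i = 0
    · simp [hi]
    · have hm : PySem.Int.mod i 0 ≠ 0 := fun hm =>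
        hi (zero_dvd_iff.mp ((PySem.Int.mod_eq_zero_iff_dvd i 0).mp hm))
      simp [hm]
  · simp [hj]

lemma a_inner (line : List Int) (i : Int) (acc : List Int) :
    (line.foldl (fun d j =>
        if i ≠ j ∧ PySem.Int.mod i j = 0 then d ++ [PySem.Int.floordiv i j] else d) acc).sum
      = acc.sum + (line.map (fun j => pvG i j)).sum := by
  induction line generalizing acc with
  | nil => simp
  | cons j l ih =>
    simp only [List.foldl_cons, List.map_cons, List.sum_cons]
    rw [ih]
    by_cases h : i ≠ j ∧ PySem.Int.mod i j = 0
    · rw [if_pos h]; simp [pvG, if_pos h, List.sum_append]; ring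
    · rw [if_neg h]; simp [pvG, if_neg h]

lemma a_outer (line lo : List Int) (acc : List Int) :
    (lo.foldl (fun d i =>
        line.foldl (fun d j =>
          if i ≠ j ∧ PySem.Int.mod i j = 0 then d ++ [PySem.Int.floordiv i j] else d) d) acc).sum
      = acc.sum + (lo.map (fun i => (line.map (fun j => pvG i j)).sum)).sum := by
  induction lo generalizing acc with
  | nil => simp
  | cons i lo ih =>
    simp only [List.foldl_cons, List.map_cons, List.sum_cons]
    rw [ih, a_inner]; ring

lemma weighted (l : List Int) (f : Int → Int) :
    ((PySem.List.dedup l).map (fun v => (l.count v : Int) * f v)).sum = (l.map f).sum := by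
  rw [← List.sum_toFinset _ (PySem.List.nodup_dedup l)]
  have hfin : (PySem.List.dedup l).toFinset = l.toFinset := by
    ext x; simp
  rw [hfin, Finset.sum_list_map_count]
  exact Finset.sum_congr rfl fun x _ => by push_cast [nsmul_eq_mul]; ring

lemma b_fold_inner (its : List (Int × Int)) (vc : Int × Int) (acc : Int) :
    (its.foldl (fun acc2 wc =>
        if vc.1 ≠ wc.1 ∧ wc.1 ≠ 0 ∧ PySem.Int.mod vc.1 wc.1 = 0
        then acc2 + vc.2 * wc.2 * PySem.Int.floordiv vc.1 wc.1 else acc2) acc)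
      = acc + (its.map (fun wc =>
          if vc.1 ≠ wc.1 ∧ wc.1 ≠ 0 ∧ PySem.Int.mod vc.1 wc.1 = 0
          then vc.2 * wc.2 * PySem.Int.floordiv vc.1 wc.1 else 0)).sum := by
  induction its generalizing acc with
  | nil => simp
  | cons wc l ih =>
    simp only [List.foldl_cons, List.map_cons, List.sum_cons]
    rw [ih]
    split_ifs <;> ring

lemma b_fold_outer (its lo : List (Int × Int)) (acc : Int) :
    (lo.foldl (fun acc vc =>
        its.foldl (fun acc2 wc =>
          if vc.1 ≠ wc.1 ∧ wc.1 ≠ 0 ∧ PySem.Int.mod vc.1 wc.1 = 0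
          then acc2 + vc.2 * wc.2 * PySem.Int.floordiv vc.1 wc.1 else acc2) acc) acc)
      = acc + (lo.map (fun vc => (its.map (fun wc =>
          if vc.1 ≠ wc.1 ∧ wc.1 ≠ 0 ∧ PySem.Int.mod vc.1 wc.1 = 0
          then vc.2 * wc.2 * PySem.Int.floordiv vc.1 wc.1 else 0)).sum)).sum := by
  induction lo generalizing acc with
  | nil => simp
  | cons vc lo ih =>
    simp only [List.foldl_cons, List.map_cons, List.sum_cons]
    rw [ih, b_fold_inner]; ring

lemma b_line (line : List Int) (t : Int) :
    (let counts := line.foldl (fun d x => d.insert x (d.getD x 0 + 1)) PySem.Dict.empty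
     counts.items.foldl (fun acc vc =>
       counts.items.foldl (fun acc2 wc =>
           if vc.1 ≠ wc.1 ∧ wc.1 ≠ 0 ∧ PySem.Int.mod vc.1 wc.1 = 0
           then acc2 + vc.2 * wc.2 * PySem.Int.floordiv vc.1 wc.1
           else acc2)
         acc)
       t)
      = t + (line.map (fun i => (line.map (fun j => pvH i j)).sum)).sum := by
  have hc : line.foldl (fun d x => d.insert x (d.getD x 0 + 1)) PySem.Dict.empty
      = PySem.Dict.counter line := PySem.Dict.foldl_insert_getD_add_one_eq_counter line
  simp only [hc]
  rw [b_fold_outer, PySem.Dict.items_counter]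
  congr 1
  have hset : PySem.Set.ofList line = PySem.List.dedup line := by simp
  rw [hset, List.map_map]
  refine Eq.trans (congrArg List.sum (List.map_congr_left fun v hv => ?_))
    (weighted line (fun i => (line.map (fun j => pvH i j)).sum))
  simp only [Function.comp_apply]
  rw [List.map_map, ← weighted line (fun j => pvH v j), ← List.sum_map_mul_left]
  refine congrArg List.sum (List.map_congr_left fun w _ => ?_)
  simp only [Function.comp_apply, pvH]
  split_ifs <;> ring

lemma a_line (line : List Int) :
    pvChecksumLine line = (line.map (fun i => (line.map (fun j => pvG i j)).sum)).sum := by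
  unfold pvChecksumLine
  rw [a_outer line line []]
  simp

lemma b_total (value : List (List Int)) (t : Int) :
    (value.foldl (fun total line =>
      let counts := line.foldl (fun d x => d.insert x (d.getD x 0 + 1)) PySem.Dict.empty
      counts.items.foldl (fun acc vc =>
        counts.items.foldl (fun acc2 wc =>
            if vc.1 ≠ wc.1 ∧ wc.1 ≠ 0 ∧ PySem.Int.mod vc.1 wc.1 = 0
            then acc2 + vc.2 * wc.2 * PySem.Int.floordiv vc.1 wc.1
            else acc2)
          acc)
        total) t)
      = t + (value.map (fun line =>
          (line.map (fun i => (line.map (fun j => pvH i j)).sum)).sum)).sum := by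
  induction value generalizing t with
  | nil => simp
  | cons line rest ih =>
    simp only [List.foldl_cons, List.map_cons, List.sum_cons]
    rw [ih, b_line]
    ring

lemma main (value : List (List Int)) :
    calculate_checksum_part2_py value = calculate_checksum_part2_py_alt value := by
  unfold calculate_checksum_part2_py calculate_checksum_part2_py_alt
  rw [b_total value 0, zero_add]
  refine congrArg List.sum (List.map_congr_left fun line _ => ?_)
  rw [a_line]
  exact congrArg List.sum (List.map_congr_left fun i _ =>
    congrArg List.sum (List.map_congr_left fun j _ => pvG_eq_pvH i j))

-- ===== VERDICT (by name: the statement is the Claim_ definition above) =====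
theorem calculate_checksum_part2_py_spec : Claim_equal_calculate_checksum_part2_py := by
  intro value _ _
  unfold Spec_calculate_checksum_part2_py
  exact main value

@[simp] theorem calculate_checksum_part2_py_raises : Claim_raises_calculate_checksum_part2_py := by
  unfold Claim_raises_calculate_checksum_part2_py
  refine ⟨fun value _ ⟨l, hl, h0, x, hx, hne⟩ hpre => hne (hpre l hl h0 x hx), by decide⟩
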